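-- pv_equiv track=rewrite | github.com/kawaipato/Programmers | 프로그래머스/unrated/135808. 과일 장수/과일 장수.py | solution
-- ===== SOURCE A (Python) =====
-- def solution(k, m, score):
--     sums=0
--     score.sort(reverse=True)
--     if (len(score) // m)==0:
--         return 0
--     else:
--         for i in range(len(score)//m):
--             sums+=score[(i+1)*m-1]*m
--         return sums
-- ===== SOURCE B (Python) =====
-- def solution(k, m, score):
--     s = sorted(score)
--     q = len(s) // m
--     if q <= 0:
--         return 0
--     total = 0
--     rest = s[len(s) % m:]
--     for _ in range(q):
--         total += rest[0]
--         rest = rest[m:]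
--     return m * total
-- ===== Notes on version B (the rewrite author's own statement) =====
-- stated objective: alternative
-- what changed: B sorts ascending, drops the len%m remainder and walks the list sequentially taking each m-chunk's head (the group minimum), multiplying by m once at the end, instead of A's descending in-place sort with per-group random-access index arithmetic (i+1)*m-1 and per-term multiplication.
import Mathlib
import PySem

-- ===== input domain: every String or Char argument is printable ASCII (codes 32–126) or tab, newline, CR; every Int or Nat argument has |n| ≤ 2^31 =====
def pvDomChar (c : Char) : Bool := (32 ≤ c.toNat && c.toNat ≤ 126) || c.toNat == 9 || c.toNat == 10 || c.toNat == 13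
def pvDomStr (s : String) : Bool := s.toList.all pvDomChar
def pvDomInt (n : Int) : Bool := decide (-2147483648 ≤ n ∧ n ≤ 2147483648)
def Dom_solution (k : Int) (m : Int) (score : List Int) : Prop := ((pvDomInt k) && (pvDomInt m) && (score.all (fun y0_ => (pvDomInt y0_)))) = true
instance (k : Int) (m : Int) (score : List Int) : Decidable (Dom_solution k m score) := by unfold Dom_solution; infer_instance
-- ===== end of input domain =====

-- B sorts ascending and walks the groups sequentially (drop remainder, take each chunk's head,
-- multiply once at the end) instead of A's descending sort with per-group index arithmetic;
-- objective: alternative. A sorts `score` in place; the equivalence is about the return value only.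


-- ===== PORT A =====
-- score.sort(reverse=True); if len//m == 0 return 0 else sum score[(i+1)*m-1]*m over i in range(len//m).
-- score[(i+1)*m-1] is ported as pyGetD with default 0: under Pre_ (m ≠ 0) the index is always in
-- range when the loop body runs (for m < 0 the range is empty).
def solution (k : Int) (m : Int) (score : List Int) : Int :=
  let s := PySem.List.sorted score (fun x => x) true
  if PySem.Int.floordiv (s.length : Int) m = 0 then 0
  else (PySem.List.pyRange 0 (PySem.Int.floordiv (s.length : Int) m) 1).foldl
        (fun sums i => sums + (PySem.List.pyGetD s ((i + 1) * m - 1) 0) * m) 0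

-- ===== PORT B =====
-- the for-loop of Source B: q iterations; total += rest[0]; rest = rest[m:]
def solutionAltGo (m : Int) : Nat → List Int → Int → Int
  | 0, _, total => total
  | q + 1, rest, total =>
      solutionAltGo m q (PySem.List.slice rest (some m) none) (total + PySem.List.pyGetD rest 0 0)

def solution_alt (k : Int) (m : Int) (score : List Int) : Int :=
  let s := PySem.List.sorted score (fun x => x) false
  let q := PySem.Int.floordiv (s.length : Int) m
  if q ≤ 0 then 0
  else m * solutionAltGo m q.toNat (PySem.List.slice s (some (PySem.Int.mod (s.length : Int) m)) none) 0

-- ===== PRECONDITION & SPEC =====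
-- Pre_ excludes exactly m = 0, where A raises ZeroDivisionError.
def Pre_solution (k : Int) (m : Int) (score : List Int) : Prop := m ≠ 0
instance (k : Int) (m : Int) (score : List Int) : Decidable (Pre_solution k m score) := by unfold Pre_solution; infer_instance
def pvWitness_solution : Int × Int × List Int := (4, 3, [1, 2, 3, 1, 2, 3, 1])

def Spec_solution (k : Int) (m : Int) (score : List Int) (out : Int) : Prop := out = solution_alt k m score
instance (k : Int) (m : Int) (score : List Int) (out : Int) : Decidable (Spec_solution k m score out) := by unfold Spec_solution; infer_instance

-- ===== CLAIM (what is proved, stated in full; the proofs are below) =====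
def Claim_equal_solution : Prop := ∀ (k : Int) (m : Int) (score : List Int), Dom_solution k m score → Pre_solution k m score → Spec_solution k m score (solution k m score)

-- ===== LEMMAS AND PROOFS =====

-- the descending sort is the reverse of the ascending sort (Int values: ties are equal elements)
lemma sorted_rev_eq_reverse (xs : List Int) :
    PySem.List.sorted xs (fun x => x) true = (PySem.List.sorted xs (fun x => x) false).reverse := by
  apply List.Perm.eq_of_pairwise (le := fun a b : Int => b ≤ a)
  · intro a b _ _ h1 h2; omega
  · exact PySem.List.sorted_pairwise_rev xs (fun x => x)
  · exact (List.pairwise_reverse).2 (PySem.List.sorted_pairwise xs (fun x => x))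
  · exact (PySem.List.sorted_perm xs (fun x => x) true).trans
      ((PySem.List.sorted_perm xs (fun x => x) false).symm.trans (List.reverse_perm _).symm)

lemma altGo_sum (M : Nat) : ∀ (q : Nat) (rest : List Int) (total : Int),
    solutionAltGo (M : Int) q rest total
      = total + ∑ j ∈ Finset.range q, (rest.drop (j * M)).headD 0 := by
  intro q
  induction q with
  | zero => intro rest total; simp [solutionAltGo]
  | succ q ih =>
      intro rest total
      have hslice : PySem.List.slice rest (some (M : Int)) none = rest.drop M :=
        PySem.List.slice_from_natCast rest M
      simp only [solutionAltGo, hslice, ih]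
      rw [Finset.sum_range_succ']
      have : ∀ j, ((rest.drop M).drop (j * M)).headD 0 = (rest.drop ((j + 1) * M)).headD 0 := by
        intro j
        rw [List.drop_drop]
        congr 1
        ring_nf
      simp only [this, PySem.List.pyGetD_zero]
      cases rest <;> simp <;> ring

-- head of a dropped suffix is indexing
lemma headD_drop (xs : List Int) (t : Nat) : (xs.drop t).headD 0 = xs.getD t 0 := by
  simp [List.head?_drop, List.getD_eq_getElem?_getD]

-- list-sum of a map over range as a Finset sum
lemma sum_map_range (n : Nat) (f : Nat → Int) :
    ((List.range n).map f).sum = ∑ i ∈ Finset.range n, f i := by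
  induction n with
  | zero => simp
  | succ n ih => simp [List.range_succ, Finset.sum_range_succ, ih]

lemma floordiv_nonpos_of_neg (a b : Int) (h : 0 ≤ a) (h2 : b < 0) :
    PySem.Int.floordiv a b ≤ 0 := by
  unfold PySem.Int.floordiv
  rw [Int.fdiv_eq_ediv]
  have : a / b ≤ 0 := Int.ediv_nonpos_of_nonneg_of_nonpos h h2.le
  split_ifs <;> omega

lemma getD_reverse (xs : List Int) (t : Nat) (h : t < xs.length) :
    xs.reverse.getD t 0 = xs.getD (xs.length - 1 - t) 0 := by
  rw [List.getD_eq_getElem _ _ (by simpa using h), List.getD_eq_getElem _ _ (by omega)]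
  simp [List.getElem_reverse]

theorem solution_spec : Claim_equal_solution := by
  intro k m score _ hm
  unfold Spec_solution solution solution_alt
  have hrev := sorted_rev_eq_reverse score
  rw [hrev]
  rcases lt_trichotomy m 0 with hneg | h0 | hpos
  · -- m < 0 : A's range is empty, B's q ≤ 0; both return 0
    have hfd2 : PySem.Int.floordiv (((PySem.List.sorted score (fun x => x) false).length : Int)) m ≤ 0 :=
      floordiv_nonpos_of_neg _ _ (by positivity) hneg
    by_cases h0 : PySem.Int.floordiv (((PySem.List.sorted score (fun x => x) false).reverse).length : Int) m = 0
    · rw [if_pos h0, if_pos (by simpa using hfd2)]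
    · rw [if_neg h0, if_pos (by simpa using hfd2)]
      rw [PySem.List.pyRange_one_eq_nil (floordiv_nonpos_of_neg _ _ (by positivity) hneg)]
      rfl
  · exact absurd h0 hm
  · -- m > 0
    lift m to ℕ using hpos.le with M
    have hMpos : 0 < M := by exact_mod_cast hpos
    set s₂ := PySem.List.sorted score (fun x => x) false with hs₂
    set n := s₂.length with hn
    set qn := n / M with hqn
    set r := n % M with hr
    have hfd : PySem.Int.floordiv (n : Int) (M : Int) = ((qn : Nat) : Int) :=
      PySem.Int.floordiv_natCast n M
    have hmod : PySem.Int.mod (n : Int) (M : Int) = ((r : Nat) : Int) :=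
      PySem.Int.mod_natCast n M
    have hdm : qn * M + r = n := by rw [mul_comm]; exact Nat.div_add_mod n M
    simp only [List.length_reverse, ← hn, hfd, hmod]
    by_cases hq0 : qn = 0
    · rw [if_pos (by simp [hq0]), if_pos (by simp [hq0])]
    · have hqpos : 0 < qn := Nat.pos_of_ne_zero hq0
      have hqA : ¬ ((qn : Int) = 0) := by exact_mod_cast hq0
      have hqB : ¬ ((qn : Int) ≤ 0) := by
        have : (0 : Int) < (qn : Int) := by exact_mod_cast hqpos
        omega
      rw [if_neg hqA, if_neg hqB]
      -- B side: slice → drop, loop → Finset sum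
      rw [PySem.List.slice_from_natCast, Int.toNat_natCast,
          altGo_sum M qn (s₂.drop r) 0, zero_add]
      -- A side: range → list → Finset sum
      rw [PySem.List.pyRange_one]
      simp only [sub_zero, Int.toNat_natCast, zero_add]
      rw [PySem.List.foldl_add _
            (fun i => PySem.List.pyGetD s₂.reverse ((i + 1) * (M : Int) - 1) 0 * (M : Int)) 0]
      rw [zero_add, List.map_map, sum_map_range]
      -- A's term k picks the reversed index n - (k+1)*M = (qn-1-k)*M + r of the ascending list
      have hA : ∀ kk ∈ Finset.range qn,
          ((fun i => PySem.List.pyGetD s₂.reverse ((i + 1) * (M : Int) - 1) 0 * (M : Int)) ∘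
              (fun j : Nat => (j : Int))) kk
            = (M : Int) * s₂.getD ((qn - 1 - kk) * M + r) 0 := by
        intro kk hk
        have hk' : kk < qn := Finset.mem_range.mp hk
        have hbq : (kk + 1) * M ≤ qn * M := Nat.mul_le_mul_right M (by omega)
        have hpos1 : 0 < (kk + 1) * M := Nat.mul_pos (by omega) hMpos
        have hb : (kk + 1) * M ≤ n := le_trans hbq (by omega)
        simp only [Function.comp]
        rw [show ((kk : Int) + 1) * (M : Int) - 1 = (((kk + 1) * M - 1 : Nat) : Int) by
              push_cast [Nat.cast_sub (by omega : 1 ≤ (kk + 1) * M)]; ring,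
            PySem.List.pyGetD_natCast, List.getD_eq_getElem?_getD, ← List.getD_eq_getElem?_getD,
            getD_reverse s₂ _ (by rw [← hn]; omega)]
        rw [mul_comm]
        congr 2
        rw [← hn, show qn - 1 - kk = qn - (kk + 1) from by omega, Nat.sub_mul]
        omega
      rw [Finset.sum_congr rfl hA]
      -- B's term j reads index j*M + r of the ascending list
      have hB : ∀ j ∈ Finset.range qn,
          ((s₂.drop r).drop (j * M)).headD 0 = s₂.getD (j * M + r) 0 := by
        intro j hj
        rw [List.drop_drop, headD_drop, Nat.add_comm]
      rw [Finset.sum_congr rfl hB, Finset.mul_sum]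
      exact Finset.sum_range_reflect (fun j => (M : Int) * s₂.getD (j * M + r) 0) qn
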